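-- pv_equiv track=rewrite | github.com/enkaflow/advent24 | 2/template2.py | safe
-- ===== SOURCE A (Python) =====
-- def safe(report):
--     is_incr = True
--     is_decr = True
--     satisfies_cond = True
--
--     prev = report[0]
--     for level in report[1:]:
--         if level < prev:
--             is_incr = False
--
--         if level > prev:
--             is_decr = False
--
--         diff = abs(prev - level)
--         if diff < 1 or diff > 3:
--             return False
--
--         prev = level
--
--     if is_incr or is_decr:
--         return True
-- ===== SOURCE B (Python) =====
-- def safe(report):
--     diffs = [b - a for a, b in zip(report, report[1:])]
--     return all(1 <= d <= 3 for d in diffs) or all(-3 <= d <= -1 for d in diffs)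
-- ===== Notes on version B (the rewrite author's own statement) =====
-- stated objective: simpler
-- what changed: Replaces A's flag-tracking single pass (is_incr/is_decr/early return) with materializing the consecutive differences once and two 'all' aggregations (all diffs between 1 and 3, or all between -3 and -1).
-- outside the precondition, e.g. on safe([1, 2, 1]): A returns None, B returns False; on safe([]): A raises IndexError, B returns True
import Mathlib
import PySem

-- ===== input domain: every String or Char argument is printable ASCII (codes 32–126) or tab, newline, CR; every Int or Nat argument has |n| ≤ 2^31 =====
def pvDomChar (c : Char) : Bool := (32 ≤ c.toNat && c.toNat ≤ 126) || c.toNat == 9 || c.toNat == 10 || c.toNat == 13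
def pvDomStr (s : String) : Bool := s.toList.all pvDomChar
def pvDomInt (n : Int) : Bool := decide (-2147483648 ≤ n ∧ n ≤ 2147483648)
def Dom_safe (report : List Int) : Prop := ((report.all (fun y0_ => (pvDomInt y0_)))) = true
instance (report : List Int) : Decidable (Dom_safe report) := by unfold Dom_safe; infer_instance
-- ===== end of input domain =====

-- B replaces A's flag-tracking loop by materializing consecutive differences and aggregating with two 'all' tests (objective: simpler).

-- ===== PORT A =====
-- A's for-loop over report[1:] with state (is_incr, is_decr, prev) and an early 'return False'.
def safeLoop (prev : Int) (is_incr is_decr : Bool) : List Int → Bool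
  | [] => is_incr || is_decr   -- A: 'if is_incr or is_decr: return True'; falls through (None) otherwise — excluded by Pre_safe
  | level :: rest =>
    let is_incr := if level < prev then false else is_incr
    let is_decr := if level > prev then false else is_decr
    let diff := (prev - level).natAbs   -- abs(prev - level), exact for Int
    if diff < 1 ∨ diff > 3 then false
    else safeLoop level is_incr is_decr rest

def safe (report : List Int) : Bool :=
  match report with
  | [] => false                 -- A raises IndexError on report[0]; excluded by Pre_safe
  | p :: rest => safeLoop p true true rest

-- ===== PORT B =====
def safe_alt (report : List Int) : Bool :=
  let diffs := (report.zip (report.drop 1)).map (fun ab => ab.2 - ab.1)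
  diffs.all (fun d => decide (1 ≤ d) && decide (d ≤ 3)) ||
  diffs.all (fun d => decide (-3 ≤ d) && decide (d ≤ -1))

-- ===== PRECONDITION & SPEC =====
-- Pre_ excludes the empty list, on which A raises IndexError, and reports whose consecutive
-- differences are all between 1 and 3 in absolute value but go in mixed directions, on which A falls
-- off the end and returns None instead of a bool.
def Pre_safe (report : List Int) : Prop :=
  report ≠ [] ∧
  (List.IsChain (fun a b => 1 ≤ (a - b).natAbs ∧ (a - b).natAbs ≤ 3) report →
    (List.IsChain (· < ·) report ∨ List.IsChain (· > ·) report))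
instance (report : List Int) : Decidable (Pre_safe report) := by unfold Pre_safe; infer_instance
def pvWitness_safe : List Int := [1, 3, 4]

def Spec_safe (report : List Int) (out : Bool) : Prop := out = safe_alt report
instance (report : List Int) (out : Bool) : Decidable (Spec_safe report out) := by unfold Spec_safe; infer_instance

-- ===== CLAIM (what is proved, stated in full; the proofs are below) =====
def Claim_equal_safe : Prop := ∀ (report : List Int), Dom_safe report → Pre_safe report → Spec_safe report (safe report)

-- ===== LEMMAS AND PROOFS =====

-- A's loop computes: all diffs valid AND (is_incr still true, i.e. nondecreasing, or is_decr still true).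
theorem safeLoop_eq (rest : List Int) : ∀ (p : Int) (i d : Bool),
    safeLoop p i d rest =
      (decide (List.IsChain (fun a b => 1 ≤ (a - b).natAbs ∧ (a - b).natAbs ≤ 3) (p :: rest)) &&
        ((i && decide (List.IsChain (fun a b : Int => a ≤ b) (p :: rest))) ||
         (d && decide (List.IsChain (fun a b : Int => a ≥ b) (p :: rest))))) := by
  induction rest with
  | nil => intro p i d; simp [safeLoop]
  | cons q rest ih =>
    intro p i d
    by_cases hv : (p - q).natAbs < 1 ∨ (p - q).natAbs > 3
    · have hfalse : decide (List.IsChain (fun a b : Int => 1 ≤ (a - b).natAbs ∧ (a - b).natAbs ≤ 3) (p :: q :: rest)) = false :=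
        decide_eq_false (fun hc => absurd (List.isChain_cons_cons.mp hc).1 (by omega))
      simp only [safeLoop]
      rw [if_pos hv, hfalse, Bool.false_and]
    · have hv' : (1 ≤ (p - q).natAbs ∧ (p - q).natAbs ≤ 3) := by omega
      simp only [safeLoop, if_neg hv, List.isChain_cons_cons]
      rw [ih]
      by_cases hlt : q < p
      · have h1 : ¬ p ≤ q := by omega
        have h2 : q ≤ p := by omega
        have h3 : ¬ p < q := by omega
        cases i <;> cases d <;> simp [hlt, h1, h2, h3, hv']
      · by_cases hgt : q > p
        · have h1 : ¬ q ≤ p := by omega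
          have h2 : p ≤ q := by omega
          have h3 : ¬ q < p := by omega
          cases i <;> cases d <;> simp [hlt, hgt, h1, h2, hv']
        · exact absurd (Or.inl (by omega : (p - q).natAbs < 1)) hv

-- bridge: 'all' over the mapped consecutive differences is an IsChain on the list
theorem all_diffs_chain (f : Int → Bool) :
    ∀ (xs : List Int),
      ((xs.zip (xs.drop 1)).map (fun ab => ab.2 - ab.1)).all f =
        decide (List.IsChain (fun a b => f (b - a) = true) xs)
  | [] => by simp
  | [p] => by simp
  | p :: q :: rest => by
    have ih := all_diffs_chain f (q :: rest)
    simp only [List.drop_succ_cons, List.drop_zero, List.zip_cons_cons, List.map_cons,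
      List.all_cons, List.isChain_cons_cons] at ih ⊢
    rw [ih]
    by_cases h : f (q - p) = true <;> simp [h]

theorem safe_alt_chain (xs : List Int) :
    safe_alt xs =
      (decide (List.IsChain (fun a b : Int => (decide (1 ≤ b - a) && decide (b - a ≤ 3)) = true) xs) ||
       decide (List.IsChain (fun a b : Int => (decide (-3 ≤ b - a) && decide (b - a ≤ -1)) = true) xs)) := by
  show (((xs.zip (xs.drop 1)).map (fun ab => ab.2 - ab.1)).all (fun d => decide (1 ≤ d) && decide (d ≤ 3)) ||
        ((xs.zip (xs.drop 1)).map (fun ab => ab.2 - ab.1)).all (fun d => decide (-3 ≤ d) && decide (d ≤ -1))) = _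
  rw [all_diffs_chain, all_diffs_chain]

theorem isChain_and (R S : Int → Int → Prop) (xs : List Int) :
    List.IsChain (fun a b => R a b ∧ S a b) xs ↔ List.IsChain R xs ∧ List.IsChain S xs := by
  induction xs with
  | nil => simp
  | cons p rest ih =>
    cases rest with
    | nil => simp
    | cons q rest' =>
      simp only [List.isChain_cons_cons] at *
      tauto

-- ===== VERDICT (by name: the statement is the Claim_ definition above) =====
theorem safe_spec : Claim_equal_safe := by
  intro report _ hpre
  unfold Spec_safe
  obtain ⟨hne, -⟩ := hpre
  match report with
  | [] => exact absurd rfl hne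
  | p :: rest =>
    show safeLoop p true true rest = _
    rw [safeLoop_eq, safe_alt_chain]
    have e1 : List.IsChain (fun a b : Int => (decide (1 ≤ b - a) && decide (b - a ≤ 3)) = true) (p :: rest) ↔
        List.IsChain (fun a b : Int => (1 ≤ (a - b).natAbs ∧ (a - b).natAbs ≤ 3) ∧ a ≤ b) (p :: rest) := by
      constructor <;> intro hc <;>
        exact hc.imp (fun a b hab => by
          simp only [Bool.and_eq_true, decide_eq_true_eq] at *; omega)
    have e2 : List.IsChain (fun a b : Int => (decide (-3 ≤ b - a) && decide (b - a ≤ -1)) = true) (p :: rest) ↔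
        List.IsChain (fun a b : Int => (1 ≤ (a - b).natAbs ∧ (a - b).natAbs ≤ 3) ∧ a ≥ b) (p :: rest) := by
      constructor <;> intro hc <;>
        exact hc.imp (fun a b hab => by
          simp only [Bool.and_eq_true, decide_eq_true_eq] at *; omega)
    rw [isChain_and] at e1 e2
    have d1 : decide (List.IsChain (fun a b : Int => (decide (1 ≤ b - a) && decide (b - a ≤ 3)) = true) (p :: rest)) =
        (decide (List.IsChain (fun a b : Int => 1 ≤ (a - b).natAbs ∧ (a - b).natAbs ≤ 3) (p :: rest)) &&
         decide (List.IsChain (fun a b : Int => a ≤ b) (p :: rest))) := by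
      rw [decide_eq_decide.mpr e1, Bool.decide_and]
    have d2 : decide (List.IsChain (fun a b : Int => (decide (-3 ≤ b - a) && decide (b - a ≤ -1)) = true) (p :: rest)) =
        (decide (List.IsChain (fun a b : Int => 1 ≤ (a - b).natAbs ∧ (a - b).natAbs ≤ 3) (p :: rest)) &&
         decide (List.IsChain (fun a b : Int => a ≥ b) (p :: rest))) := by
      rw [decide_eq_decide.mpr e2, Bool.decide_and]
    rw [d1, d2, Bool.true_and, Bool.true_and, Bool.and_or_distrib_left]
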